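-- pv_equiv track=rewrite | github.com/maksym-bielyshev/dp_189_taqc | elementary/chessboard/functional.py | create_chessboard
-- ===== SOURCE A (Python) =====
-- def create_chessboard(height, width) -> list:
--     """Create a chessboard by specified parameters.
--
--     :return: list with lines to print a chessboard
--     """
--     chessboard_list = []
--     for index in range(height):
--         if index % 2 == 0:
--             chessboard_list.append(width * "* ")
--         else:
--             chessboard_list.append(width * " *")
--     return chessboard_list
-- ===== SOURCE B (Python) =====
-- def create_chessboard(height, width) -> list:
--     """Create a chessboard by specified parameters.
--
--     :return: list with lines to print a chessboard
--     """
--     return [''.join('*' if (i + j) % 2 == 0 else ' ' for j in range(2 * width))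
--             for i in range(height)]
-- ===== Notes on version B (the rewrite author's own statement) =====
-- stated objective: alternative
-- what changed: Each row is built by a per-cell pass over the 2*width columns using (i+j) parity joined into a string, instead of A's even/odd branch with string repetition of two-character blocks.
import Mathlib
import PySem

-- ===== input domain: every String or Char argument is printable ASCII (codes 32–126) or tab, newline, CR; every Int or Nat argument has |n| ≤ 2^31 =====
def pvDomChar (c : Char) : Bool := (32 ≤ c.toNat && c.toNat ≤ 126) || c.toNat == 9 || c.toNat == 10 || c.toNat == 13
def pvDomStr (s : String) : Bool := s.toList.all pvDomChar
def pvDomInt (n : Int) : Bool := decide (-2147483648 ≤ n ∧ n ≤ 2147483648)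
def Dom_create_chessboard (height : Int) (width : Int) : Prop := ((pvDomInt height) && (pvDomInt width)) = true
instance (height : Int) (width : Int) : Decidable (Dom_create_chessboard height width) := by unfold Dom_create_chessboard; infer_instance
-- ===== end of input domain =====

-- B builds each row with a per-cell pass over 2*width columns using (i+j) parity, instead of
-- A's two-branch string repetition; objective: alternative decomposition (same cost).


-- ===== PORT A =====
def create_chessboard (height : Int) (width : Int) : List String :=
  (PySem.List.pyRange 0 height 1).foldl (fun chessboard_list index =>
    if PySem.Int.mod index 2 == 0 then
      chessboard_list ++ [String.mk (PySem.List.pyRepeat ['*', ' '] width)]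
    else
      chessboard_list ++ [String.mk (PySem.List.pyRepeat [' ', '*'] width)]) []

-- ===== PORT B =====
def create_chessboard_alt (height : Int) (width : Int) : List String :=
  (PySem.List.pyRange 0 height 1).map (fun i =>
    String.mk (PySem.Chars.join []
      ((PySem.List.pyRange 0 (2 * width) 1).map
        (fun j => if PySem.Int.mod (i + j) 2 == 0 then ['*'] else [' ']))))

-- ===== PRECONDITION & SPEC =====
def Spec_create_chessboard (height : Int) (width : Int) (out : List String) : Prop := out = create_chessboard_alt height width
instance (height : Int) (width : Int) (out : List String) : Decidable (Spec_create_chessboard height width out) := by unfold Spec_create_chessboard; infer_instance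

-- ===== CLAIM (what is proved, stated in full; the proofs are below) =====
def Claim_equal_create_chessboard : Prop := ∀ (height : Int) (width : Int), Dom_create_chessboard height width → Spec_create_chessboard height width (create_chessboard height width)

-- ===== LEMMAS AND PROOFS =====

theorem pymod2_eq (a : Int) : PySem.Int.mod a 2 = a % 2 := by
  have h := PySem.Int.floordiv_mul_add_mod a 2
  have h2 := PySem.Int.mod_two_eq a
  omega

-- one row of B's per-cell pass equals A's repeated two-char pattern
theorem row_chars (i : Int) (n : Nat) :
    (List.range (2 * n)).map
        (fun (k : Nat) => if PySem.Int.mod (i + (k : Int)) 2 == 0 then '*' else ' ')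
      = (List.replicate n
          (if PySem.Int.mod i 2 == 0 then ['*', ' '] else [' ', '*'])).flatten := by
  induction n with
  | zero => simp
  | succ m ih =>
    have h1 : 2 * (m + 1) = (2 * m + 1) + 1 := by ring
    rw [h1, List.range_succ, List.range_succ, List.replicate_succ',
      List.map_append, List.map_append, List.flatten_append, ih, List.append_assoc]
    congr 1
    have ha : PySem.Int.mod (i + ((2 * m : Nat) : Int)) 2 = PySem.Int.mod i 2 := by
      rw [pymod2_eq, pymod2_eq]; push_cast; omega
    have hb : PySem.Int.mod (i + ((2 * m + 1 : Nat) : Int)) 2 = 1 - PySem.Int.mod i 2 := by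
      rw [pymod2_eq, pymod2_eq]; push_cast; omega
    simp only [List.map_cons, List.map_nil, ha, hb]
    rcases PySem.Int.mod_two_eq i with h | h <;> rw [h] <;> decide

theorem row_eq (i width : Int) :
    PySem.Chars.join []
        ((PySem.List.pyRange 0 (2 * width) 1).map
          (fun j => if PySem.Int.mod (i + j) 2 == 0 then ['*'] else [' ']))
      = (if PySem.Int.mod i 2 == 0 then PySem.List.pyRepeat ['*', ' '] width
         else PySem.List.pyRepeat [' ', '*'] width) := by
  have hmap :
      ((PySem.List.pyRange 0 (2 * width) 1).map
          (fun j => if PySem.Int.mod (i + j) 2 == 0 then ['*'] else [' ']))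
        = ((PySem.List.pyRange 0 (2 * width) 1).map
            (fun j => if PySem.Int.mod (i + j) 2 == 0 then '*' else ' ')).map
            (fun c => [c]) := by
    rw [List.map_map]
    apply List.map_congr_left
    intro j _
    by_cases hc : (PySem.Int.mod (i + j) 2 == 0) = true
    · rw [Function.comp_apply, if_pos hc, if_pos hc]
    · rw [Function.comp_apply, if_neg hc, if_neg hc]
  rw [hmap, PySem.Chars.join_nil_singletons, PySem.List.pyRange_one, List.map_map]
  have h2 : (2 * width - 0).toNat = 2 * width.toNat := by omega
  rw [h2]
  have hfun :
      ((fun j => if PySem.Int.mod (i + j) 2 == 0 then '*' else ' ') ∘ fun (k : Nat) => (0 : Int) + (k : Int))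
        = (fun (k : Nat) => if PySem.Int.mod (i + (k : Int)) 2 == 0 then '*' else ' ') := by
    funext k
    rw [Function.comp_apply, zero_add]
  rw [hfun, row_chars]
  unfold PySem.List.pyRepeat
  by_cases hc : (PySem.Int.mod i 2 == 0) = true
  · rw [if_pos hc, if_pos hc]
  · rw [if_neg hc, if_neg hc]

-- ===== VERDICT (by name: the statement is the Claim_ definition above) =====
theorem create_chessboard_spec : Claim_equal_create_chessboard := by
  intro height width _
  unfold Spec_create_chessboard create_chessboard create_chessboard_alt
  have hfold :
      ∀ (l : List Int) (acc : List String),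
        l.foldl (fun chessboard_list index =>
          if PySem.Int.mod index 2 == 0 then
            chessboard_list ++ [String.mk (PySem.List.pyRepeat ['*', ' '] width)]
          else
            chessboard_list ++ [String.mk (PySem.List.pyRepeat [' ', '*'] width)]) acc
          = acc ++ l.map (fun i =>
              String.mk (if PySem.Int.mod i 2 == 0 then PySem.List.pyRepeat ['*', ' '] width
                         else PySem.List.pyRepeat [' ', '*'] width)) := by
    intro l
    induction l with
    | nil => simp
    | cons x xs ih =>
      intro acc
      rw [List.foldl_cons, List.map_cons]
      by_cases hx : (PySem.Int.mod x 2 == 0) = true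
      · rw [if_pos hx, if_pos hx, ih]; simp
      · rw [if_neg hx, if_neg hx, ih]; simp
  rw [hfold]
  rw [List.nil_append]
  apply List.map_congr_left
  intro i _
  rw [row_eq]
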